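-- pv_equiv track=rewrite | github.com/pypi-data/pypi-mirror-327 | packages/xi_covutils/xi_covutils-0.1.17.tar.gz/xi_covutils-0.1.17/xi_covutils/msa.py | _gapstrip_template
-- ===== SOURCE A (Python) =====
-- def _gapstrip_template(sequences, use_reference):
--     if use_reference:
--         template = [char == "-" for char in sequences[0]]
--     else:
--         templates = [[char == "-" for char in seq] for seq in sequences]
--         template = [True for _ in range(len(templates[0]))]
--         for temp in templates:
--             template = [x and y for x, y in zip(temp, template)]
--     return template
-- ===== SOURCE B (Python) =====
-- def _gapstrip_template(sequences, use_reference):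
--     if use_reference:
--         return [char == "-" for char in sequences[0]]
--     return [all(char == "-" for char in col) for col in zip(*sequences)]
-- ===== Notes on version B (the rewrite author's own statement) =====
-- stated objective: idiomatic
-- what changed: The non-reference branch no longer builds one gap mask per row and folds them into a running AND template; it transposes the alignment with zip(*sequences) and reduces each column with all(), a single column-wise pass.
import Mathlib
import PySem

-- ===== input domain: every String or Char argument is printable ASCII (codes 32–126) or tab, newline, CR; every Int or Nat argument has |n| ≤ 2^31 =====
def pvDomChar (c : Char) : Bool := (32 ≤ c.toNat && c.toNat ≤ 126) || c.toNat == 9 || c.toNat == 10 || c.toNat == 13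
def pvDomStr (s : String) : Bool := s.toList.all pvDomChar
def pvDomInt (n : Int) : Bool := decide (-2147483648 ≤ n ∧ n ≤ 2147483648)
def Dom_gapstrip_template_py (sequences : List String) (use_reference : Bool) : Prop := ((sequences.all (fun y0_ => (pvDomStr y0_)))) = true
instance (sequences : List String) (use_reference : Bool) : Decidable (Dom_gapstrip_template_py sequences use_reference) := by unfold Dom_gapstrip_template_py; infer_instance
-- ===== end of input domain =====

-- B replaces the row-mask fold of A by an idiomatic column-wise pass (zip(*sequences) + all);
-- same cost, different traversal.


-- ===== PORT A =====
-- literal transliteration of _gapstrip_template: per-row gap masks, all-True template, folded AND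
def gapstrip_template_py (sequences : List String) (use_reference : Bool) : List Bool :=
  if use_reference then
    ((PySem.List.pyGet? sequences 0).getD "").toList.map (fun char => char == '-')
  else
    let templates := sequences.map (fun seq => seq.toList.map (fun char => char == '-'))
    let template := (List.range ((PySem.List.pyGet? templates 0).getD []).length).map (fun _ => true)
    templates.foldl (fun template temp => (temp.zip template).map (fun p => p.1 && p.2)) template

-- ===== PORT B =====
-- exact port of Python zip(*rows): list of columns, truncated to the shortest row
def pvZipStar (rows : List (List Char)) : List (List Char) :=
  match rows with
  | [] => []
  | [r] => r.map (fun c => [c])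
  | r :: rs => (r.zip (pvZipStar rs)).map (fun p => p.1 :: p.2)

def gapstrip_template_py_alt (sequences : List String) (use_reference : Bool) : List Bool :=
  if use_reference then
    ((PySem.List.pyGet? sequences 0).getD "").toList.map (fun char => char == '-')
  else
    (pvZipStar (sequences.map String.toList)).map (fun col => col.all (fun char => char == '-'))

-- ===== PRECONDITION & SPEC =====
-- Pre_ excludes only the empty sequence list, on which A raises IndexError.
def Pre_gapstrip_template_py (sequences : List String) (use_reference : Bool) : Prop :=
  sequences ≠ []
instance (sequences : List String) (use_reference : Bool) : Decidable (Pre_gapstrip_template_py sequences use_reference) := by unfold Pre_gapstrip_template_py; infer_instance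

def pvWitness_gapstrip_template_py : List String × Bool := (["a-b", "-ab"], false)

def Spec_gapstrip_template_py (sequences : List String) (use_reference : Bool) (out : List Bool) : Prop := out = gapstrip_template_py_alt sequences use_reference
instance (sequences : List String) (use_reference : Bool) (out : List Bool) : Decidable (Spec_gapstrip_template_py sequences use_reference out) := by unfold Spec_gapstrip_template_py; infer_instance

-- ===== CLAIM (what is proved, stated in full; the proofs are below) =====
def Claim_equal_gapstrip_template_py : Prop := ∀ (sequences : List String) (use_reference : Bool), Dom_gapstrip_template_py sequences use_reference → Pre_gapstrip_template_py sequences use_reference → Spec_gapstrip_template_py sequences use_reference (gapstrip_template_py sequences use_reference)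


-- ===== LEMMAS AND PROOFS =====

-- pointwise AND on optional booleans: the value of one fold/zip step at a fixed index
def pvOb (x y : Option Bool) : Option Bool :=
  match x, y with
  | some a, some b => some (a && b)
  | _, _ => none

theorem pvOb_comm (x y : Option Bool) : pvOb x y = pvOb y x := by
  cases x <;> cases y <;> simp [pvOb, Bool.and_comm]

theorem pvOb_left_comm (x y z : Option Bool) : pvOb x (pvOb y z) = pvOb y (pvOb x z) := by
  cases x <;> cases y <;> cases z <;> simp [pvOb, Bool.and_left_comm]

theorem pvStep_getElem (t m : List Bool) (i : ℕ) :
    ((m.zip t).map (fun p => p.1 && p.2))[i]? = pvOb m[i]? t[i]? := by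
  rw [List.zip, List.getElem?_map, List.getElem?_zipWith]
  cases m[i]? <;> cases t[i]? <;> simp [pvOb]

theorem pvFoldA_getElem (ms : List (List Bool)) (t : List Bool) (i : ℕ) :
    (List.foldl (fun template temp => (temp.zip template).map (fun p => p.1 && p.2)) t ms)[i]?
      = List.foldl (fun o m => pvOb m[i]? o) t[i]? ms := by
  induction ms generalizing t with
  | nil => rfl
  | cons m ms ih => simp only [List.foldl_cons, ih, pvStep_getElem]

theorem pvOb_assoc (x y z : Option Bool) : pvOb (pvOb x y) z = pvOb x (pvOb y z) := by
  cases x <;> cases y <;> cases z <;> simp [pvOb, Bool.and_assoc]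

theorem pvFold_swap (l : List (List Bool)) (x y : Option Bool) (i : ℕ) :
    pvOb (List.foldl (fun o m => pvOb m[i]? o) x l) y
      = List.foldl (fun o m => pvOb m[i]? o) (pvOb x y) l := by
  induction l generalizing x with
  | nil => exact pvOb_comm x y ▸ rfl
  | cons m l ih => simp only [List.foldl_cons, ih, pvOb_assoc, pvOb_left_comm]

theorem pvB_getElem (r : List Char) (rs : List (List Char)) (i : ℕ) :
    ((pvZipStar (r :: rs)).map (fun col => col.all (fun char => char == '-')))[i]?
      = List.foldl (fun o m => pvOb m[i]? o)
          (r.map (fun char => char == '-'))[i]?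
          (rs.map (fun s => s.map (fun char => char == '-'))) := by
  induction rs generalizing r with
  | nil =>
    simp only [pvZipStar, List.map_map, List.getElem?_map]
    cases r[i]? <;> simp
  | cons r2 rs ih =>
    have hz : ((pvZipStar (r :: r2 :: rs)).map (fun col => col.all (fun char => char == '-')))[i]?
        = pvOb (r.map (fun char => char == '-'))[i]?
            (((pvZipStar (r2 :: rs)).map (fun col => col.all (fun char => char == '-')))[i]?) := by
      show (((r.zip (pvZipStar (r2 :: rs))).map (fun p => p.1 :: p.2)).map
              (fun col => col.all (fun char => char == '-')))[i]? = _
      rw [List.map_map, List.zip]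
      simp only [List.getElem?_map, List.getElem?_zipWith]
      cases r[i]? <;> cases (pvZipStar (r2 :: rs))[i]? <;> simp [pvOb]
    rw [hz, ih, List.map_cons, List.foldl_cons, pvOb_comm, pvFold_swap]

theorem gapstrip_template_py_eq (sequences : List String) (use_reference : Bool)
    (hpre : sequences ≠ []) :
    gapstrip_template_py sequences use_reference = gapstrip_template_py_alt sequences use_reference := by
  cases use_reference with
  | true => rfl
  | false =>
    obtain ⟨s0, rest, rfl⟩ := List.exists_cons_of_ne_nil hpre
    unfold gapstrip_template_py gapstrip_template_py_alt
    simp only [Bool.false_eq_true, if_false]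
    apply List.ext_getElem?
    intro i
    rw [pvFoldA_getElem, List.map_cons, List.foldl_cons]
    -- initial template: same length as first mask, all true, so first step yields the first mask
    have ht : ((List.range ((PySem.List.pyGet? ((s0.toList.map (fun char => char == '-')) :: rest.map (fun seq => seq.toList.map (fun char => char == '-'))) 0).getD []).length).map (fun _ => true))[i]?
        = if i < (s0.toList.map (fun char => char == '-')).length then some true else none := by
      simp [PySem.List.pyGet?, PySem.List.pyIdx?, List.map_const', List.getElem?_replicate]
    rw [ht]
    have hinit : pvOb (s0.toList.map (fun char => char == '-'))[i]?
        (if i < (s0.toList.map (fun char => char == '-')).length then some true else none)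
        = (s0.toList.map (fun char => char == '-'))[i]? := by
      by_cases h : i < (s0.toList.map (fun char => char == '-')).length
      · rw [List.getElem?_eq_getElem h]
        have h' : i < s0.length := by simpa using h
        simp [pvOb, h']
      · simp [List.getElem?_eq_none (Nat.le_of_not_lt h), pvOb]
    rw [hinit, List.map_cons, pvB_getElem, List.map_map]
    rfl

-- ===== VERDICT (by name: the statement is the Claim_ definition above) =====
theorem gapstrip_template_py_spec : Claim_equal_gapstrip_template_py := by
  intro sequences use_reference _ hpre
  unfold Spec_gapstrip_template_py
  exact gapstrip_template_py_eq sequences use_reference hpre
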